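-- pv_equiv track=rewrite | github.com/aaryakatore537-cmd/careerguidance2026 | search_10th.py | brute_force_decode
-- ===== SOURCE A (Python) =====
-- def brute_force_decode(text):
--     if not text:
--         return ""
--     decoded = ""
--     for char in text:
--         o = ord(char)
--         if o == ord('#'):
--             decoded += ' '
--         elif o == ord(','):
--             decoded += '/'
--         elif 60 <= o <= 85: # Uppercase-ish range
--             decoded += chr(o + 5)
--         elif 86 <= o <= 122: # Lowercase-ish range
--             decoded += chr(o + 11)
--         elif 45 <= o <= 58: # Number/Symbol range
--             if char == '-': decoded += '1'
--             elif char == '.': decoded += '2'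
--             elif char == '/': decoded += '0'
--             else: decoded += chr(o + 1)
--         else:
--             decoded += char
--     return decoded
-- ===== SOURCE B (Python) =====
-- def brute_force_decode(text):
--     # Build the full translation table once, then do one flat translate pass.
--     table = {35: ord(' '), 44: ord('/')}
--     for o in range(60, 86):
--         table[o] = o + 5
--     for o in range(86, 123):
--         table[o] = o + 11
--     for o in range(48, 59):
--         table[o] = o + 1
--     table[45] = ord('1')
--     table[46] = ord('2')
--     table[47] = ord('0')
--     return text.translate(table)
-- ===== Notes on version B (the rewrite author's own statement) =====
-- stated objective: idiomatic
-- what changed: Replaces the per-character if/elif chain with string concatenation inside a loop by a translation table built once from the band ranges and a single str.translate pass.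
import Mathlib
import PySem

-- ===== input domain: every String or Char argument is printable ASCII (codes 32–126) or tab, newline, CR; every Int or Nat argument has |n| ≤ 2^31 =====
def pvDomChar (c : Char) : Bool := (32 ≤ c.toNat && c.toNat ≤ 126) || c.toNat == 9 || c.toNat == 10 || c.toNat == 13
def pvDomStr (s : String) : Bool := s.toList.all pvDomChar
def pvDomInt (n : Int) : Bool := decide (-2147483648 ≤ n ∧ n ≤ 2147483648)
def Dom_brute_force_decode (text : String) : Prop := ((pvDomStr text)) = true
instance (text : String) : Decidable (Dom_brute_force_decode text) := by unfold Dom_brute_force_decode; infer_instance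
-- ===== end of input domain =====

-- B replaces A's per-character if/elif chain with a translation table built once plus one translate pass (idiomatic; same result).

-- ===== PORT A =====
-- one iteration of A's loop body: the if/elif chain on o = ord(char)
def pvStepA (o : Int) (ch : Char) : List Char :=
  if o == 35 then [' ']
  else if o == 44 then ['/']
  else if 60 ≤ o ∧ o ≤ 85 then [Char.ofNat (o + 5).toNat]
  else if 86 ≤ o ∧ o ≤ 122 then [Char.ofNat (o + 11).toNat]
  else if 45 ≤ o ∧ o ≤ 58 then
    (if ch == '-' then ['1']
     else if ch == '.' then ['2']
     else if ch == '/' then ['0']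
     else [Char.ofNat (o + 1).toNat])
  else [ch]

def brute_force_decode (text : String) : String :=
  if text = "" then ""
  else String.mk (text.toList.foldl (fun decoded ch => decoded ++ pvStepA (ch.toNat : Int) ch) [])

-- ===== PORT B =====
-- the translation table of Source B, built once
def pvTable : PySem.Dict Int Int :=
  let t := PySem.Dict.ofList [((35 : Int), (32 : Int)), (44, 47)]
  let t := (PySem.List.pyRange 60 86 1).foldl (fun t o => t.insert o (o + 5)) t
  let t := (PySem.List.pyRange 86 123 1).foldl (fun t o => t.insert o (o + 11)) t
  let t := (PySem.List.pyRange 48 59 1).foldl (fun t o => t.insert o (o + 1)) t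
  let t := t.insert 45 49
  let t := t.insert 46 50
  t.insert 47 48

-- the per-character step of str.translate with an all-int table: look the code point up, unmapped chars pass through
def pvStepB (ch : Char) : Char :=
  match pvTable.get? (ch.toNat : Int) with
  | some v => Char.ofNat v.toNat
  | none => ch

-- text.translate(table)
def brute_force_decode_alt (text : String) : String :=
  String.mk (text.toList.map pvStepB)

-- ===== PRECONDITION & SPEC =====
def Spec_brute_force_decode (text : String) (out : String) : Prop := out = brute_force_decode_alt text
instance (text : String) (out : String) : Decidable (Spec_brute_force_decode text out) := by unfold Spec_brute_force_decode; infer_instance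

-- ===== CLAIM (what is proved, stated in full; the proofs are below) =====
def Claim_equal_brute_force_decode : Prop := ∀ (text : String), Dom_brute_force_decode text → Spec_brute_force_decode text (brute_force_decode text)

-- ===== LEMMAS AND PROOFS =====

set_option maxRecDepth 40000 in
lemma pvStep_eq (ch : Char) (h : pvDomChar ch = true) :
    pvStepA (ch.toNat : Int) ch = [pvStepB ch] := by
  have hle : ch.toNat ≤ 126 := by
    simp [pvDomChar] at h; omega
  rw [← Char.ofNat_toNat ch]
  generalize ch.toNat = n at hle
  interval_cases n <;> rfl

lemma pvFold_eq (l : List Char) (acc : List Char) (h : ∀ c ∈ l, pvDomChar c = true) :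
    l.foldl (fun decoded ch => decoded ++ pvStepA (ch.toNat : Int) ch) acc
      = acc ++ l.map pvStepB := by
  induction l generalizing acc with
  | nil => simp
  | cons x xs ih =>
    simp only [List.foldl_cons, List.map_cons]
    rw [pvStep_eq x (h x (by simp)), ih _ (fun c hc => h c (by simp [hc]))]
    simp

-- ===== VERDICT (by name: the statement is the Claim_ definition above) =====
theorem brute_force_decode_spec : Claim_equal_brute_force_decode := by
  intro text hdom
  unfold Spec_brute_force_decode brute_force_decode brute_force_decode_alt
  have hall : ∀ c ∈ text.toList, pvDomChar c = true := by
    simpa [Dom_brute_force_decode, pvDomStr, List.all_eq_true] using hdom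
  split_ifs with he
  · subst he; rfl
  · rw [pvFold_eq _ _ hall, List.nil_append]
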